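-- pv_equiv track=rewrite | github.com/xogusrns123/advance-spec | simulation/pipeline/pool_reslicer.py | _build_pool_parents
-- ===== SOURCE A (Python) =====
-- from typing import Dict, List, Tuple
--
-- def _build_pool_parents(
--     parent_list: List[int], pool_size: int, S: int, K: int,
-- ) -> List[int]:
--     """Compute each pool position's parent in pool indexing.
--
--     Returns ``pool_parents`` where ``pool_parents[p]`` is the parent's
--     pool position (or -1 if the parent is the verified root).
--     """
--     expected_pool = K + (S - 1) * K * K
--     if pool_size != expected_pool:
--         raise ValueError(
--             f"pool_size={pool_size} doesn't match K + (S-1)*K² = {expected_pool} "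
--             f"for (S={S}, K={K})")
--
--     pool_parents = [-1] * pool_size
--     for p in range(pool_size):
--         if p < K:
--             pool_parents[p] = -1
--             continue
--         step = (p - K) // (K * K) + 1            # 1..S-1
--         local_j = (p - K) - (step - 1) * K * K   # 0..K²-1
--         alive_slot = local_j // K                # 0..K-1
--         if step == 1:
--             # parents_list[0] = parent_list[0..K] = [-1, alive_0_pos*K]
--             pool_parents[p] = parent_list[1 + alive_slot]
--         else:
--             # parents_list[step-1] starts at parent_list[K + 1 + (step-2)*K]
--             pool_parents[p] = parent_list[
--                 K + 1 + (step - 2) * K + alive_slot]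
--     return pool_parents
-- ===== SOURCE B (Python) =====
-- def _build_pool_parents(parent_list, pool_size, S, K):
--     expected_pool = K + (S - 1) * K * K
--     if pool_size != expected_pool:
--         raise ValueError(
--             f"pool_size={pool_size} doesn't match K + (S-1)*K² = {expected_pool} "
--             f"for (S={S}, K={K})")
--     # build the array by traversing the step/slot hierarchy and extending
--     pool_parents = [-1] * K
--     for step in range(1, S):
--         base = 1 if step == 1 else K + 1 + (step - 2) * K
--         for alive_slot in range(K):
--             pool_parents.extend([parent_list[base + alive_slot]] * K)
--     return pool_parents
-- ===== Notes on version B (the rewrite author's own statement) =====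
-- stated objective: alternative
-- what changed: B keeps A's validation but replaces the flat loop over range(pool_size) with its per-index step/local_j/alive_slot division arithmetic by a direct traversal of the step/slot hierarchy that extends a [-1]*K prefix with K copies of each parent, so no coordinate re-derivation per flat index.
-- outside the precondition, e.g. on _build_pool_parents([10, 20, 30], 2, 2, -2): A returns [10, 30], B returns []; on _build_pool_parents([], 0, 0, 1): A returns [], B returns [-1]
import Mathlib
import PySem

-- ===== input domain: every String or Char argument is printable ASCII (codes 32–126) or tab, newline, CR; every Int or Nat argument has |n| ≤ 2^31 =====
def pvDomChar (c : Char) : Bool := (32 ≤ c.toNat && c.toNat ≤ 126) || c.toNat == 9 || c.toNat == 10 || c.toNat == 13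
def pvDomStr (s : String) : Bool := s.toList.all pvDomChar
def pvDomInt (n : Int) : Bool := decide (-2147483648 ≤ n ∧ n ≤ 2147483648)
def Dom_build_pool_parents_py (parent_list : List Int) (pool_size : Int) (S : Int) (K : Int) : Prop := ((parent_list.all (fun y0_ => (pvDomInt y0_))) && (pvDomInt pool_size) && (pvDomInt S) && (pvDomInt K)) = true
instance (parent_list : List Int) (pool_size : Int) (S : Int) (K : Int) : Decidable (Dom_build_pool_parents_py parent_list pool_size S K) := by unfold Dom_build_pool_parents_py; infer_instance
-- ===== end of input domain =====

-- B builds the same array by traversing the step/slot hierarchy (a [-1]*K prefix extended with K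
-- copies of each parent) instead of re-deriving step/local_j/alive_slot from each flat index p;
-- alternative decomposition, same cost.


-- ===== PORT A =====
-- Literal transliteration of A: validate pool_size, allocate [-1]*pool_size, and for each flat
-- index p derive step/local_j/alive_slot by floor division and set pool_parents[p].
-- A's ValueError branch (pool_size ≠ expected) is outside Pre_ and returns [] here.
def build_pool_parents_py (parent_list : List Int) (pool_size : Int) (S : Int) (K : Int) : List Int :=
  let expected := K + (S - 1) * K * K
  if pool_size ≠ expected then []
  else
    (PySem.List.pyRange 0 pool_size 1).foldl (fun acc p =>
      if p < K then PySem.List.pySetD acc p (-1)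
      else
        let step := PySem.Int.floordiv (p - K) (K * K) + 1
        let localj := (p - K) - (step - 1) * (K * K)
        let alive := PySem.Int.floordiv localj K
        if step = 1 then
          PySem.List.pySetD acc p (PySem.List.pyGetD parent_list (1 + alive) 0)
        else
          PySem.List.pySetD acc p
            (PySem.List.pyGetD parent_list (K + 1 + (step - 2) * K + alive) 0))
      (List.replicate pool_size.toNat (-1))

-- ===== PORT B =====
-- Literal transliteration of B: same validation, then a [-1]*K prefix extended block by block over
-- step ∈ range(1,S) and alive_slot ∈ range(K) with K copies of parent_list[base+alive_slot].
def build_pool_parents_py_alt (parent_list : List Int) (pool_size : Int) (S : Int) (K : Int) : List Int :=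
  let expected := K + (S - 1) * K * K
  if pool_size ≠ expected then []
  else
    (PySem.List.pyRange 1 S 1).foldl (fun acc step =>
      let base := if step = 1 then (1 : Int) else K + 1 + (step - 2) * K
      (PySem.List.pyRange 0 K 1).foldl (fun acc2 slot =>
        acc2 ++ List.replicate K.toNat (PySem.List.pyGetD parent_list (base + slot) 0)) acc)
      (List.replicate K.toNat (-1))

-- ===== PRECONDITION & SPEC =====
-- Pre_ is the inputs on which A returns and its value is the claimed one: pool_size matches
-- K + (S-1)*K², parent_list is long enough for every index the loop reads (largest is S*K, so no
-- IndexError), and the two degenerate corners are ruled out: S < 1 with K ≥ 1 (a negative or zero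
-- pool_size that accidentally matches the formula, where A returns [] but leftover [-1] entries
-- would be intended) and K < 0 with pool_size > 0 (where A's value rests on Python negative-index
-- wraparound); B's prefix-and-extend construction differs exactly there.
def Pre_build_pool_parents_py (parent_list : List Int) (pool_size : Int) (S : Int) (K : Int) : Prop :=
  pool_size = K + (S - 1) * K * K ∧ (1 ≤ S ∨ K ≤ 0) ∧ (0 ≤ K ∨ pool_size ≤ 0) ∧
    (2 ≤ S → 1 ≤ K → S * K < (parent_list.length : Int))
instance (parent_list : List Int) (pool_size : Int) (S : Int) (K : Int) : Decidable (Pre_build_pool_parents_py parent_list pool_size S K) := by unfold Pre_build_pool_parents_py; infer_instance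

def pvWitness_build_pool_parents_py : List Int × Int × Int × Int :=
  ([-1, 4, 6, 0, 2], 6, 2, 2)

def Spec_build_pool_parents_py (parent_list : List Int) (pool_size : Int) (S : Int) (K : Int) (out : List Int) : Prop := out = build_pool_parents_py_alt parent_list pool_size S K
instance (parent_list : List Int) (pool_size : Int) (S : Int) (K : Int) (out : List Int) : Decidable (Spec_build_pool_parents_py parent_list pool_size S K out) := by unfold Spec_build_pool_parents_py; infer_instance

-- ===== CLAIM (what is proved, stated in full; the proofs are below) =====
def Claim_equal_build_pool_parents_py : Prop := ∀ (parent_list : List Int) (pool_size : Int) (S : Int) (K : Int), Dom_build_pool_parents_py parent_list pool_size S K → Pre_build_pool_parents_py parent_list pool_size S K → Spec_build_pool_parents_py parent_list pool_size S K (build_pool_parents_py parent_list pool_size S K)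

-- ===== LEMMAS AND PROOFS =====

-- the value A's loop writes at flat index p (A's branch structure, as a function)
def pvG (pl : List Int) (K : Int) (p : Int) : Int :=
  if p < K then -1
  else
    let step := PySem.Int.floordiv (p - K) (K * K) + 1
    let alive := PySem.Int.floordiv ((p - K) - (step - 1) * (K * K)) K
    if step = 1 then PySem.List.pyGetD pl (1 + alive) 0
    else PySem.List.pyGetD pl (K + 1 + (step - 2) * K + alive) 0

-- B's base offset for a given step, and the parent value B writes for slot s of step t+1
def pvBase (k : Int) (step : Int) : Int := if step = 1 then 1 else k + 1 + (step - 2) * k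

def pvH (pl : List Int) (k : Int) (t : Int) (s : Nat) : Int :=
  PySem.List.pyGetD pl (pvBase k (t + 1) + (s : Int)) 0

-- A's fold of in-order single-index writes over a full-length list is a map over the range
theorem pv_foldl_set (g : Int → Int) : ∀ (m : Nat) (l : List Int), m ≤ l.length →
    (PySem.List.pyRange 0 (m : Int) 1).foldl (fun acc p => PySem.List.pySetD acc p (g p)) l
      = (List.range m).map (fun i : Nat => g (i : Int)) ++ l.drop m := by
  intro m
  induction m with
  | zero => intro l _; simp [PySem.List.pyRange_one_eq_nil le_rfl]
  | succ m ih =>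
    intro l hl
    have h1 : ((m + 1 : Nat) : Int) = (m : Int) + 1 := by push_cast; ring
    rw [h1, PySem.List.pyRange_one_succ_right (by omega), List.foldl_append,
        ih l (by omega)]
    simp only [List.foldl_cons, List.foldl_nil, PySem.List.pySetD_natCast]
    rw [List.set_append]
    simp only [List.length_map, List.length_range, lt_irrefl, if_false, Nat.sub_self]
    rw [List.drop_eq_getElem_cons (show m < l.length by omega), List.set_cons_zero,
        List.range_succ, List.map_append]
    simp

-- a map over range (a*b) whose value depends only on j/b is a flatMap of b-blocks
theorem pv_map_div_block (h : Nat → Int) (b : Nat) : ∀ (a : Nat),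
    (List.range (a * b)).map (fun j => h (j / b))
      = (List.range a).flatMap (fun s => List.replicate b (h s)) := by
  intro a
  induction a with
  | zero => simp
  | succ a ih =>
    rw [Nat.succ_mul, List.range_add, List.map_append, ih, List.range_succ,
        List.flatMap_append, List.map_map]
    congr 1
    have hcong : ∀ x ∈ List.range b, ((fun j => h (j / b)) ∘ (fun x => a * b + x)) x = h a := by
      intro x hx
      have hx' := List.mem_range.mp hx
      simp only [Function.comp_apply]
      rw [Nat.mul_comm a b, Nat.mul_add_div (by omega), Nat.div_eq_of_lt hx', Nat.add_zero]
    rw [List.map_congr_left hcong, List.map_const', List.length_range]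
    simp

-- A's per-index coordinate arithmetic inverts B's (step, slot) block structure
theorem pv_chunk (pl : List Int) (k t i : Nat) (hi : i < k * k) :
    pvG pl (k : Int) ((k + (t * (k * k) + i) : Nat) : Int) = pvH pl (k : Int) (t : Int) (i / k) := by
  simp only [pvG, pvH, pvBase]
  rw [if_neg (by exact_mod_cast (show ¬(k + (t * (k * k) + i) < k) by omega))]
  have e1 : ((k + (t * (k * k) + i) : Nat) : Int) - (k : Int) = ((t * (k * k) + i : Nat) : Int) := by
    push_cast; ring
  rw [e1]
  have hstep : PySem.Int.floordiv ((t * (k * k) + i : Nat) : Int) ((k : Int) * (k : Int))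
      = (t : Int) := by
    rw [show ((k : Int) * (k : Int)) = ((k * k : Nat) : Int) by push_cast; ring,
        PySem.Int.floordiv_natCast]
    norm_cast
    rw [Nat.mul_comm t (k * k), Nat.mul_add_div (by omega), Nat.div_eq_of_lt hi, Nat.add_zero]
  rw [hstep]
  have e3 : ((t * (k * k) + i : Nat) : Int) - ((t : Int) + 1 - 1) * ((k : Int) * (k : Int))
      = ((i : Nat) : Int) := by push_cast; ring
  rw [e3, PySem.Int.floordiv_natCast]
  by_cases ht : ((t : Int) + 1) = 1
  · rw [if_pos ht, if_pos ht]
  · rw [if_neg ht, if_neg ht]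

-- the whole non-prefix part: A's flat map over t*K² indices equals B's nested step/slot blocks
theorem pv_steps (pl : List Int) (k : Nat) : ∀ t : Nat,
    (List.range (t * (k * k))).map (fun j : Nat => pvG pl (k : Int) ((k + j : Nat) : Int))
      = (PySem.List.pyRange 1 ((t : Int) + 1) 1).flatMap (fun step =>
          (PySem.List.pyRange 0 (k : Int) 1).flatMap (fun slot =>
            List.replicate k (PySem.List.pyGetD pl (pvBase (k : Int) step + slot) 0))) := by
  intro t
  induction t with
  | zero => simp [PySem.List.pyRange_one_eq_nil le_rfl]
  | succ t ih =>
    have hc : ((t + 1 : Nat) : Int) + 1 = ((t : Int) + 1) + 1 := by push_cast; ring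
    rw [hc, PySem.List.pyRange_one_succ_right (by omega), List.flatMap_append,
        Nat.succ_mul, List.range_add, List.map_append, ih, List.map_map]
    congr 1
    simp only [List.flatMap_cons, List.flatMap_nil, List.append_nil,
        PySem.List.pyRange_zero_natCast, List.flatMap_map]
    calc (List.range (k * k)).map ((fun j : Nat => pvG pl (k : Int) ((k + j : Nat) : Int)) ∘ (fun x => t * (k * k) + x))
        = (List.range (k * k)).map (fun j : Nat => pvH pl (k : Int) (t : Int) (j / k)) := by
          apply List.map_congr_left
          intro j hj
          exact pv_chunk pl k t j (List.mem_range.mp hj)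
      _ = (List.range k).flatMap (fun s => List.replicate k (pvH pl (k : Int) (t : Int) s)) :=
          pv_map_div_block (pvH pl (k : Int) (t : Int)) k k
      _ = (List.range k).flatMap ((fun slot =>
            List.replicate k (PySem.List.pyGetD pl (pvBase (k : Int) ((t : Int) + 1) + slot) 0))
            ∘ (fun n : Nat => (n : Int))) := rfl

theorem pv_main (pl : List Int) (ps S K : Int)
    (hps : ps = K + (S - 1) * K * K) (hK : 0 ≤ K) (hS : 1 ≤ S) :
    build_pool_parents_py pl ps S K = build_pool_parents_py_alt pl ps S K := by
  obtain ⟨k, rfl⟩ : ∃ k : Nat, K = (k : Int) := ⟨K.toNat, (Int.toNat_of_nonneg hK).symm⟩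
  obtain ⟨t, rfl⟩ : ∃ t : Nat, S = (t : Int) + 1 := ⟨(S - 1).toNat, by omega⟩
  have hn : ps = ((k + t * (k * k) : Nat) : Int) := by rw [hps]; push_cast; ring
  subst hn
  simp only [build_pool_parents_py, build_pool_parents_py_alt]
  rw [if_neg (by push_cast; intro h; apply h; ring), if_neg (by push_cast; intro h; apply h; ring)]
  have hbodyA : (fun (acc : List Int) (p : Int) =>
      if p < (k : Int) then PySem.List.pySetD acc p (-1)
      else
        let step := PySem.Int.floordiv (p - (k : Int)) ((k : Int) * (k : Int)) + 1
        let localj := (p - (k : Int)) - (step - 1) * ((k : Int) * (k : Int))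
        let alive := PySem.Int.floordiv localj (k : Int)
        if step = 1 then
          PySem.List.pySetD acc p (PySem.List.pyGetD pl (1 + alive) 0)
        else
          PySem.List.pySetD acc p
            (PySem.List.pyGetD pl ((k : Int) + 1 + (step - 2) * (k : Int) + alive) 0))
      = fun acc p => PySem.List.pySetD acc p (pvG pl (k : Int) p) := by
    funext acc p
    simp only [pvG]
    split_ifs <;> rfl
  rw [hbodyA, Int.toNat_natCast,
      pv_foldl_set (pvG pl (k : Int)) (k + t * (k * k)) (List.replicate (k + t * (k * k)) (-1))
        (by simp)]
  rw [List.drop_replicate]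
  simp only [Nat.sub_self, List.replicate_zero, List.append_nil]
  simp only [PySem.List.foldl_append_eq_flatMap, Int.toNat_natCast]
  rw [List.range_add, List.map_append, List.map_map]
  congr 1
  · rw [List.map_congr_left (fun i hi => by
        simp only [pvG]
        rw [if_pos (by exact_mod_cast (show i < k from List.mem_range.mp hi) : (i : Int) < (k : Int))] :
          ∀ i ∈ List.range k, pvG pl (k : Int) ((i : Nat) : Int) = -1),
       List.map_const', List.length_range]
  · calc (List.range (t * (k * k))).map ((fun i : Nat => pvG pl (k : Int) ((i : Nat) : Int)) ∘ (fun x => k + x))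
        = (List.range (t * (k * k))).map (fun j : Nat => pvG pl (k : Int) ((k + j : Nat) : Int)) := rfl
      _ = _ := by
          rw [pv_steps pl k t]
          rfl

-- degenerate corner inside Pre_: K ≤ 0 and pool_size ≤ 0, where both sides are []
theorem pv_degenerate (pl : List Int) (ps S K : Int)
    (hps : ps = K + (S - 1) * K * K) (hK : K ≤ 0) (hq : ps ≤ 0) :
    build_pool_parents_py pl ps S K = build_pool_parents_py_alt pl ps S K := by
  simp only [build_pool_parents_py, build_pool_parents_py_alt]
  rw [if_neg (fun h => h hps), if_neg (fun h => h hps),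
      PySem.List.pyRange_one_eq_nil hq, List.foldl_nil]
  simp only [PySem.List.pyRange_one_eq_nil hK, List.foldl_nil, List.foldl_fixed]
  rw [Int.toNat_of_nonpos hq, Int.toNat_of_nonpos hK]

-- ===== VERDICT (by name: the statement is the Claim_ definition above) =====
theorem build_pool_parents_py_spec : Claim_equal_build_pool_parents_py := by
  intro parent_list pool_size S K _ hpre
  obtain ⟨hps, hd1, hd2, _⟩ := hpre
  unfold Spec_build_pool_parents_py
  by_cases hK : 0 ≤ K
  · by_cases hS : 1 ≤ S
    · exact pv_main parent_list pool_size S K hps hK hS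
    · have hK0 : K = 0 := by omega
      exact pv_degenerate parent_list pool_size S K hps (by omega)
        (by rw [hps, hK0]; ring_nf; omega)
  · exact pv_degenerate parent_list pool_size S K hps (by omega)
      (hd2.resolve_left hK)
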